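-- pv_equiv track=rewrite | github.com/hadhramaut/python-practice | codewars/6 level/secret_message.py | find_secret_message
-- ===== SOURCE A (Python) =====
-- def find_secret_message(paragraph):
--     paragraph = ''.join([c for c in paragraph.lower() if c in 'abcdefghijklmnopqrstuvwxyz '])
--     temp, result = [], []
--     for word in paragraph.split():
--         if word not in temp:
--             temp.append(word)
--         elif word not in result:
--             result.append(word)
--     return " ".join(i for i in result)
-- ===== SOURCE B (Python) =====
-- def find_secret_message(paragraph):
--     cleaned = ''.join(c for c in paragraph.lower() if c in 'abcdefghijklmnopqrstuvwxyz ')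
--     words = cleaned.split()
--     positions = {}
--     for i, w in enumerate(words):
--         positions.setdefault(w, []).append(i)
--     repeated = [w for w in positions if len(positions[w]) >= 2]
--     repeated.sort(key=lambda w: positions[w][1])
--     return " ".join(repeated)
-- ===== Notes on version B (the rewrite author's own statement) =====
-- stated objective: alternative
-- what changed: Replaces A's incremental two-list membership bookkeeping with staged passes: build a complete word->occurrence-indices dict, filter the words with at least two occurrences, and sort them by their second occurrence index.
import Mathlib
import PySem

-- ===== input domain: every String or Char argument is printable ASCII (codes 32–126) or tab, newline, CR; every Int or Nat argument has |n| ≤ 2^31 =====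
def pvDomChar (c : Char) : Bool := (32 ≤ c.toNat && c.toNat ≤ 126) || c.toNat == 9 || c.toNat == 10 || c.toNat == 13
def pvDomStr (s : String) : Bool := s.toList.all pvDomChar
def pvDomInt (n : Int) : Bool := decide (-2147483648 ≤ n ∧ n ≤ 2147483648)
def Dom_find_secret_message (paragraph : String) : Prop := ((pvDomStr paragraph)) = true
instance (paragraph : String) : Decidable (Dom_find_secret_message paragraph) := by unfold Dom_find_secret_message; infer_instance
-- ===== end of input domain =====

-- B replaces A's incremental two-list membership bookkeeping by staged passes: a complete
-- word -> occurrence-indices dict, a filter for words occurring at least twice, and a sort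
-- by the second occurrence index (objective: alternative).

-- ===== PORT A =====
-- the for-loop over words with state (temp, result)
def pvLoopA : List String → List String → List String → List String
  | [], _, result => result
  | w :: ws, temp, result =>
    if ¬ temp.contains w then pvLoopA ws (temp ++ [w]) result
    else if ¬ result.contains w then pvLoopA ws temp (result ++ [w])
    else pvLoopA ws temp result

def find_secret_message (paragraph : String) : String :=
  let cleaned := String.ofList ((PySem.Str.lower paragraph).toList.filter
      (fun c => "abcdefghijklmnopqrstuvwxyz ".toList.contains c))
  PySem.Str.join " " (pvLoopA (PySem.Str.split₀ cleaned) [] [])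

-- ===== PORT B =====
def find_secret_message_alt (paragraph : String) : String :=
  let cleaned := String.ofList ((PySem.Str.lower paragraph).toList.filter
      (fun c => "abcdefghijklmnopqrstuvwxyz ".toList.contains c))
  let words := PySem.Str.split₀ cleaned
  -- for i, w in enumerate(words): positions.setdefault(w, []).append(i)
  let positions := (PySem.List.enumerate words).foldl
      (fun d p => d.insert p.2 (d.getD p.2 [] ++ [p.1])) PySem.Dict.empty
  let repeated := positions.keys.filter (fun w => decide (2 ≤ (positions.getD w []).length))
  PySem.Str.join " "
    (PySem.List.sorted repeated (fun w => PySem.List.pyGetD (positions.getD w []) 1 0) false)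

-- ===== PRECONDITION & SPEC =====
def Spec_find_secret_message (paragraph : String) (out : String) : Prop := out = find_secret_message_alt paragraph
instance (paragraph : String) (out : String) : Decidable (Spec_find_secret_message paragraph out) := by unfold Spec_find_secret_message; infer_instance

-- ===== CLAIM (what is proved, stated in full; the proofs are below) =====
def Claim_equal_find_secret_message : Prop := ∀ (paragraph : String), Dom_find_secret_message paragraph → Spec_find_secret_message paragraph (find_secret_message paragraph)

-- ===== LEMMAS AND PROOFS =====

-- occurrence indices of w in a word list, counting from offset n
def pvOcc : List String → Int → String → List Int
  | [], _, _ => []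
  | x :: xs, n, w => if x = w then n :: pvOcc xs (n + 1) w else pvOcc xs (n + 1) w

-- the common value both programs compute: the words emitted at their second occurrence,
-- scanning ws with already-processed prefix p
def pvSpec : List String → List String → List String
  | _, [] => []
  | p, w :: ws => if p.count w = 1 then w :: pvSpec (p ++ [w]) ws else pvSpec (p ++ [w]) ws

theorem count_append_self (p : List String) (w : String) :
    (p ++ [w]).count w = p.count w + 1 := by
  simp [List.count_append]

theorem count_append_ne (p : List String) (w w' : String) (h : w' ≠ w) :
    (p ++ [w]).count w' = p.count w' := by
  simp [List.count_append, Ne.symm h]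

theorem count_cons_self (x : String) (xs : List String) :
    (x :: xs).count x = xs.count x + 1 := by
  simp

theorem count_cons_ne (x : String) (xs : List String) (w : String) (h : w ≠ x) :
    (x :: xs).count w = xs.count w := by
  simp [Ne.symm h]

theorem pvOcc_append (p q : List String) (n : Int) (w : String) :
    pvOcc (p ++ q) n w = pvOcc p n w ++ pvOcc q (n + p.length) w := by
  induction p generalizing n with
  | nil => simp [pvOcc]
  | cons x xs ih =>
    simp only [List.cons_append, pvOcc, ih, List.length_cons]
    split_ifs <;> simp <;> ring_nf

theorem length_pvOcc (p : List String) (n : Int) (w : String) :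
    (pvOcc p n w).length = p.count w := by
  induction p generalizing n with
  | nil => simp [pvOcc]
  | cons x xs ih =>
    simp only [pvOcc]
    by_cases h : x = w
    · subst h; simp [ih]
    · simp [h, ih]

theorem mem_pvOcc_ge (p : List String) (n : Int) (w : String) (i : Int) (h : i ∈ pvOcc p n w) :
    n ≤ i := by
  induction p generalizing n with
  | nil => simp [pvOcc] at h
  | cons x xs ih =>
    simp only [pvOcc] at h
    split_ifs at h with hx
    · rcases List.mem_cons.mp h with rfl | h
      · omega
      · have := ih (n + 1) h; omega
    · have := ih (n + 1) h; omega

theorem pvLoopA_eq_spec (ws : List String) : ∀ (p temp result : List String),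
    (∀ w, w ∈ temp ↔ 1 ≤ p.count w) →
    (∀ w, w ∈ result ↔ 2 ≤ p.count w) →
    pvLoopA ws temp result = result ++ pvSpec p ws := by
  induction ws with
  | nil => intro p temp result _ _; simp [pvLoopA, pvSpec]
  | cons w ws ih =>
    intro p temp result htemp hres
    by_cases h0 : p.count w = 0
    · have htemp' : ∀ w', w' ∈ temp ++ [w] ↔ 1 ≤ (p ++ [w]).count w' := by
        intro w'
        by_cases h : w' = w
        · subst h; rw [count_append_self]; simp
        · rw [count_append_ne _ _ _ h]; simp [h, htemp]
      have hresKeep : ∀ w', w' ∈ result ↔ 2 ≤ (p ++ [w]).count w' := by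
        intro w'
        by_cases h : w' = w
        · subst h; rw [count_append_self, hres]; omega
        · rw [count_append_ne _ _ _ h, hres]
      have hnt : temp.contains w = false := by
        simp only [List.contains_eq_mem, decide_eq_false_iff_not]
        intro hmem; have := (htemp w).mp hmem; omega
      simp only [pvLoopA, hnt, Bool.false_eq_true, not_false_eq_true, if_true]
      rw [ih (p ++ [w]) _ _ htemp' hresKeep]
      simp [pvSpec, h0]
    · have htempKeep : ∀ w', w' ∈ temp ↔ 1 ≤ (p ++ [w]).count w' := by
        intro w'
        by_cases h : w' = w
        · subst h; rw [count_append_self, htemp]; omega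
        · rw [count_append_ne _ _ _ h, htemp]
      have ht : temp.contains w = true := by
        simp only [List.contains_eq_mem, decide_eq_true_eq]; exact (htemp w).mpr (by omega)
      by_cases h1 : p.count w = 1
      · have hres2 : ∀ w', w' ∈ result ++ [w] ↔ 2 ≤ (p ++ [w]).count w' := by
          intro w'
          by_cases h : w' = w
          · subst h; rw [count_append_self, h1]
            simp
          · rw [count_append_ne _ _ _ h]; simp [h, hres]
        have hnr : result.contains w = false := by
          simp only [List.contains_eq_mem, decide_eq_false_iff_not]
          intro hmem; have := (hres w).mp hmem; omega
        simp only [pvLoopA, ht, hnr, Bool.false_eq_true, not_false_eq_true, if_true,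
          not_true_eq_false, if_false]
        rw [ih (p ++ [w]) _ _ htempKeep hres2]
        simp [pvSpec, h1]
      · have hresKeep : ∀ w', w' ∈ result ↔ 2 ≤ (p ++ [w]).count w' := by
          intro w'
          by_cases h : w' = w
          · subst h; rw [count_append_self, hres]; omega
          · rw [count_append_ne _ _ _ h, hres]
        have hr : result.contains w = true := by
          simp only [List.contains_eq_mem, decide_eq_true_eq]; exact (hres w).mpr (by omega)
        simp only [pvLoopA, ht, hr, not_true_eq_false, if_false]
        rw [ih (p ++ [w]) _ _ htempKeep hresKeep]
        simp [pvSpec, h1]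

theorem mem_pvSpec (ws : List String) : ∀ (p : List String) (w : String),
    w ∈ pvSpec p ws ↔ (p.count w ≤ 1 ∧ 2 ≤ p.count w + ws.count w) := by
  induction ws with
  | nil => intro p w; simp [pvSpec]
  | cons x xs ih =>
    intro p w
    simp only [pvSpec]
    split_ifs with h1
    · rw [List.mem_cons, ih]
      by_cases h : w = x
      · subst h
        rw [count_append_self, count_cons_self, h1]
        constructor
        · intro _; omega
        · intro _; left; rfl
      · rw [count_append_ne _ _ _ h, count_cons_ne _ _ _ h]
        simp only [h, false_or]
    · rw [ih]
      by_cases h : w = x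
      · subst h
        rw [count_append_self, count_cons_self]
        omega
      · rw [count_append_ne _ _ _ h, count_cons_ne _ _ _ h]

theorem nodup_pvSpec (ws : List String) : ∀ (p : List String), (pvSpec p ws).Nodup := by
  induction ws with
  | nil => intro p; simp [pvSpec]
  | cons x xs ih =>
    intro p
    simp only [pvSpec]
    split_ifs with h1
    · refine List.nodup_cons.mpr ⟨?_, ih _⟩
      rw [mem_pvSpec]
      simp [List.count_append, h1]
    · exact ih _

-- the key both sides sort by: the second occurrence index in the full word list
theorem pyGetD_second (l1 : List Int) (x : Int) (t : List Int) (h : l1.length = 1) :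
    PySem.List.pyGetD (l1 ++ x :: t) 1 0 = x := by
  match l1, h with
  | [a], _ => simp [PySem.List.pyGetD]

theorem pyGetD_second_mem (l1 l2 : List Int) (h1 : l1.length ≤ 1) (h2 : 2 ≤ l1.length + l2.length) :
    PySem.List.pyGetD (l1 ++ l2) 1 0 ∈ l2 := by
  match l1, l2 with
  | [], a :: b :: t => simp [PySem.List.pyGetD]
  | [a], b :: t => simp [PySem.List.pyGetD]
  | a :: b :: t, _ => simp at h1
  | [], [] => simp at h2
  | [], [a] => simp at h2
  | [a], [] => simp at h2

theorem pairwise_pvSpec (full : List String) : ∀ (ws p : List String), full = p ++ ws →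
    (pvSpec p ws).Pairwise (fun a b =>
      PySem.List.pyGetD (pvOcc full 0 a) 1 0 < PySem.List.pyGetD (pvOcc full 0 b) 1 0) := by
  intro ws
  induction ws with
  | nil => intro p _; simp [pvSpec]
  | cons w ws ih =>
    intro p hfull
    simp only [pvSpec]
    split_ifs with h1
    · refine List.pairwise_cons.mpr ⟨?_, ih (p ++ [w]) (by simp [hfull])⟩
      intro w' hw'
      -- key w = p.length
      have hkw : PySem.List.pyGetD (pvOcc full 0 w) 1 0 = (p.length : Int) := by
        rw [hfull, pvOcc_append]
        simp only [pvOcc, if_true, zero_add]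
        exact pyGetD_second _ _ _ (by rw [length_pvOcc]; exact h1)
      -- key w' ∈ pvOcc ws (p.length + 1) w', hence > p.length
      have hmem := (mem_pvSpec ws (p ++ [w]) w').mp hw'
      have hsplit : pvOcc full 0 w' =
          pvOcc (p ++ [w]) 0 w' ++ pvOcc ws ((p.length : Int) + 1) w' := by
        rw [hfull, show p ++ w :: ws = (p ++ [w]) ++ ws by simp, pvOcc_append]
        simp
      have hval : PySem.List.pyGetD (pvOcc full 0 w') 1 0 ∈ pvOcc ws ((p.length : Int) + 1) w' := by
        rw [hsplit]
        refine pyGetD_second_mem _ _ (by rw [length_pvOcc]; exact hmem.1) ?_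
        rw [length_pvOcc, length_pvOcc]; omega
      have := mem_pvOcc_ge _ _ _ _ hval
      omega
    · exact ih (p ++ [w]) (by simp [hfull])

-- B's positions dict holds exactly the occurrence-index lists
theorem positions_getD (l : List (Int × String)) :
    ∀ (d : PySem.Dict String (List Int)) (w : String),
    (l.foldl (fun d p => d.insert p.2 (d.getD p.2 [] ++ [p.1])) d).getD w [] =
      d.getD w [] ++ (l.filter (fun p => p.2 == w)).map (·.1) := by
  induction l with
  | nil => intro d w; simp
  | cons q l ih =>
    intro d w
    simp only [List.foldl_cons, List.filter_cons]
    rw [ih]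
    by_cases h : q.2 = w
    · simp [h]
    · have : (q.2 == w) = false := by simpa using h
      simp [this, PySem.Dict.getD_insert, Ne.symm h]

theorem enumerate_filter_occ (ws : List String) : ∀ (s : Int) (w : String),
    ((PySem.List.enumerate ws s).filter (fun p => p.2 == w)).map (·.1) = pvOcc ws s w := by
  induction ws with
  | nil => intro s w; simp [PySem.List.enumerate_nil, pvOcc]
  | cons x xs ih =>
    intro s w
    rw [PySem.List.enumerate_cons]
    simp only [List.filter_cons, pvOcc]
    by_cases h : x = w
    · simp [h, ih]
    · have : (x == w) = false := by simpa using h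
      simp [this, h, ih]

-- ===== VERDICT (by name: the statement is the Claim_ definition above) =====
set_option maxHeartbeats 800000 in
theorem find_secret_message_spec : Claim_equal_find_secret_message := by
  intro paragraph _
  show find_secret_message paragraph = find_secret_message_alt paragraph
  simp only [find_secret_message, find_secret_message_alt]
  set words := PySem.Str.split₀ (String.ofList ((PySem.Str.lower paragraph).toList.filter
      (fun c => "abcdefghijklmnopqrstuvwxyz ".toList.contains c))) with hwords
  set d := (PySem.List.enumerate words).foldl
      (fun d p => d.insert p.2 (d.getD p.2 [] ++ [p.1])) PySem.Dict.empty with hd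
  have hget : ∀ w, d.getD w [] = pvOcc words 0 w := by
    intro w
    rw [hd, positions_getD, enumerate_filter_occ]
    simp [PySem.Dict.getD_empty]
  have hkeys : d.keys = PySem.Set.ofList words := by
    rw [hd, PySem.Dict.keys_foldl_insert_key]
    simp [PySem.Set.update_nil_left, PySem.List.map_snd_enumerate, PySem.Dict.keys_empty]
  refine congrArg (PySem.Str.join " ") ?_
  -- A's loop computes pvSpec [] words
  rw [pvLoopA_eq_spec words [] [] [] (by simp) (by simp)]
  simp only [List.nil_append]
  -- B's sorted filter equals pvSpec [] words by sorted_eq_of_perm_of_pairwise_lt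
  have hperm : (pvSpec [] words).Perm
      (d.keys.filter (fun w => decide (2 ≤ (d.getD w []).length))) := by
    refine (List.perm_ext_iff_of_nodup (nodup_pvSpec words []) ?_).mpr ?_
    · exact List.Nodup.filter _ (by rw [hkeys]; exact PySem.Set.nodup_ofList words)
    · intro w
      rw [mem_pvSpec, List.mem_filter, hkeys, hget, length_pvOcc]
      simp only [PySem.Set.mem_ofList, decide_eq_true_eq, List.count_nil]
      constructor
      · rintro ⟨_, h2⟩
        exact ⟨List.count_pos_iff.mp (by omega), by omega⟩
      · rintro ⟨_, h2⟩; exact ⟨by simp, by omega⟩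
  have hpw : (pvSpec [] words).Pairwise (fun a b =>
      (fun w => PySem.List.pyGetD (d.getD w []) 1 0) a <
      (fun w => PySem.List.pyGetD (d.getD w []) 1 0) b) := by
    simp only [hget]
    exact pairwise_pvSpec words words [] (by simp)
  exact (PySem.List.sorted_eq_of_perm_of_pairwise_lt _ _ _ hperm hpw).symm
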